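-- pv_equiv track=rewrite | github.com/TriggerJames/alx-frontend-for-fun | markdown2html.py | convert_unordered_list
-- ===== SOURCE A (Python) =====
-- def convert_unordered_list(lines):
--     """
--     Convert Markdown unordered lists to HTML unordered lists.
--     """
--     html_lines = []
--     inside_ulist = False
--     for line in lines:
--         if line.startswith('- '):
--             if not inside_ulist:
--                 html_lines.append("<ul>")
--                 inside_ulist = True
--             html_lines.append(f"<li>{line[2:].strip()}</li>")
--         else:
--             if inside_ulist:
--                 html_lines.append("</ul>")
--                 inside_ulist = False
--             html_lines.append(line)
--     if inside_ulist:
--         html_lines.append("</ul>")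
--     return html_lines
-- ===== SOURCE B (Python) =====
-- def convert_unordered_list(lines):
--     """
--     Convert Markdown unordered lists to HTML unordered lists.
--     Run-based: each maximal run of '- ' lines is consumed by an inner loop
--     and wrapped in <ul>...</ul>; no inside_ulist flag.
--     """
--     out = []
--     i = 0
--     n = len(lines)
--     while i < n:
--         line = lines[i]
--         if line.startswith('- '):
--             out.append("<ul>")
--             out.append("<li>" + line[2:].strip() + "</li>")
--             i += 1
--             while i < n and lines[i].startswith('- '):
--                 out.append("<li>" + lines[i][2:].strip() + "</li>")
--                 i += 1
--             out.append("</ul>")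
--         else:
--             out.append(line)
--             i += 1
--     return out
-- ===== Notes on version B (the rewrite author's own statement) =====
-- stated objective: alternative
-- what changed: Replaces the stateful inside_ulist flag with run-based processing: an outer loop that, on a '- ' line, consumes the whole maximal run with an inner loop and wraps it in <ul>/</ul>.
import Mathlib
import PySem

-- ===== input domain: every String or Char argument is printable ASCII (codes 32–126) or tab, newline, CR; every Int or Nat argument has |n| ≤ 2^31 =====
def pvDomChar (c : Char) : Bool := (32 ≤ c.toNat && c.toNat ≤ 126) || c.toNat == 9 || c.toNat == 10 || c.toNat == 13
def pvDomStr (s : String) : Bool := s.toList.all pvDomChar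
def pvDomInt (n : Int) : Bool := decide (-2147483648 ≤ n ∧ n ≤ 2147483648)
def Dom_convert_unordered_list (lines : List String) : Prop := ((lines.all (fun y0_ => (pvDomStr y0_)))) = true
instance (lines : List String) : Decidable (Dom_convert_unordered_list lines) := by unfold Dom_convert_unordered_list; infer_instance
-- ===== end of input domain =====

-- B replaces A's inside_ulist flag with run-based processing (outer loop + inner loop over each
-- maximal '- ' run); same O(n) cost, different decomposition.

-- ===== PORT A =====
-- A-side helper: the body of A's for-loop (state = (html_lines, inside_ulist))
def pvStepA (st : List String × Bool) (line : String) : List String × Bool :=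
  if PySem.Str.startswith line "- " then
    ((if !st.2 then st.1 ++ ["<ul>"] else st.1) ++
      ["<li>" ++ PySem.Str.strip (PySem.Str.slice line (some 2) none) ++ "</li>"], true)
  else
    ((if st.2 then st.1 ++ ["</ul>"] else st.1) ++ [line], false)

def convert_unordered_list (lines : List String) : List String :=
  let s := lines.foldl pvStepA ([], false)
  if s.2 then s.1 ++ ["</ul>"] else s.1

-- ===== PORT B =====
-- B-side helpers: pvAltGo is Source B's outer loop, pvAltRun its inner while over a '- ' run
mutual
def pvAltGo : List String → List String
  | [] => []
  | l :: rest =>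
    if PySem.Str.startswith l "- " then
      "<ul>" :: ("<li>" ++ PySem.Str.strip (PySem.Str.slice l (some 2) none) ++ "</li>") :: pvAltRun rest
    else
      l :: pvAltGo rest
def pvAltRun : List String → List String
  | [] => ["</ul>"]
  | l :: rest =>
    if PySem.Str.startswith l "- " then
      ("<li>" ++ PySem.Str.strip (PySem.Str.slice l (some 2) none) ++ "</li>") :: pvAltRun rest
    else
      "</ul>" :: l :: pvAltGo rest
end

def convert_unordered_list_alt (lines : List String) : List String := pvAltGo lines

-- ===== PRECONDITION & SPEC =====
def Spec_convert_unordered_list (lines : List String) (out : List String) : Prop := out = convert_unordered_list_alt lines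
instance (lines : List String) (out : List String) : Decidable (Spec_convert_unordered_list lines out) := by unfold Spec_convert_unordered_list; infer_instance

-- ===== CLAIM (what is proved, stated in full; the proofs are below) =====
def Claim_equal_convert_unordered_list : Prop := ∀ (lines : List String), Dom_convert_unordered_list lines → Spec_convert_unordered_list lines (convert_unordered_list lines)

-- ===== LEMMAS AND PROOFS =====
-- Invariant: closing A's fold started from (h, false) yields h ++ pvAltGo, from (h, true) yields h ++ pvAltRun.
theorem pvInv (lines : List String) : ∀ h : List String,
    ((let s := lines.foldl pvStepA (h, false); if s.2 then s.1 ++ ["</ul>"] else s.1) = h ++ pvAltGo lines)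
  ∧ ((let s := lines.foldl pvStepA (h, true); if s.2 then s.1 ++ ["</ul>"] else s.1) = h ++ pvAltRun lines) := by
  induction lines with
  | nil => intro h; constructor <;> simp [pvAltGo, pvAltRun]
  | cons l rest ih =>
    intro h
    by_cases hl : PySem.Chars.startswith l.toList ['-', ' '] = true <;>
      constructor <;>
        simp [List.foldl_cons, pvStepA, hl, pvAltGo, pvAltRun, (ih _).1, (ih _).2]

-- ===== VERDICT (by name: the statement is the Claim_ definition above) =====
theorem convert_unordered_list_spec : Claim_equal_convert_unordered_list := by
  intro lines _
  unfold Spec_convert_unordered_list convert_unordered_list convert_unordered_list_alt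
  simpa using (pvInv lines []).1
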